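-- pv_equiv track=rewrite | github.com/BroadbandForum/obbaa-onu-simulator | obbaa_onusim/rest_api.py | index_to_mask
-- ===== SOURCE A (Python) =====
-- def index_to_mask(indexes):
--     str_mask = ''
--     for i in range(1, 17):
--         if i in indexes:
--             str_mask = str_mask + '1'
--         else:
--             str_mask = str_mask + '0'
--     return str_mask, int(str_mask, 2)
-- ===== SOURCE B (Python) =====
-- def index_to_mask(indexes):
--     int_mask = sum(1 << (16 - i) for i in range(1, 17) if i in indexes)
--     return format(int_mask, '016b'), int_mask
-- ===== Notes on version B (the rewrite author's own statement) =====
-- stated objective: idiomatic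
-- what changed: B computes the integer mask directly as a sum of bit weights 1 << (16 - i) and then formats it as a 16-digit binary string, reversing A's dependency (A concatenates a character per index and then parses the string with int(.., 2)).
import Mathlib
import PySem

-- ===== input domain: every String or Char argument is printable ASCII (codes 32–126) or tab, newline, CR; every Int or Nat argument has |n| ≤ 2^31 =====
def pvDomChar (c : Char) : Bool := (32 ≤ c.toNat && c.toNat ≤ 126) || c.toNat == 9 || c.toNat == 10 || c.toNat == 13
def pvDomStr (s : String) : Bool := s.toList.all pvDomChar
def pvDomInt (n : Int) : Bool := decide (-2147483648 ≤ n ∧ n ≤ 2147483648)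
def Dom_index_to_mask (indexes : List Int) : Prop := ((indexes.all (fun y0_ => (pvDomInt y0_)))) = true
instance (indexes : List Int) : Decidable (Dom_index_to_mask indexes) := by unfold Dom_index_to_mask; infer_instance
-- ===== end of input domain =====

-- B builds the 16-bit integer mask directly as a sum of bit weights and then formats it in
-- binary, reversing A's order (A concatenates a digit string and parses it with int(s, 2));
-- objective: idiomatic, same cost.

-- ===== PORT A =====
-- int(str_mask, 2): str_mask here is always 16 chars of '0'/'1', so int(·, 2) is ported
-- exactly as the plain base-2 digit fold (no sign/whitespace/underscore cases are reachable).
def index_to_mask (indexes : List Int) : String × Int :=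
  let str_mask := (PySem.List.pyRange 1 17 1).foldl
    (fun s i => if indexes.contains i then s ++ "1" else s ++ "0") ""
  (str_mask, str_mask.toList.foldl (fun a c => 2 * a + (if c == '1' then 1 else 0)) 0)

-- ===== PORT B =====
-- format(n, '016b'): 16 binary digits, most significant first; exact for 0 ≤ n < 2^16,
-- which int_mask always satisfies.
def bin016 : Nat → Int → List Char
  | 0, _ => []
  | k+1, n => bin016 k (n / 2) ++ [if n % 2 == 1 then '1' else '0']

def index_to_mask_alt (indexes : List Int) : String × Int :=
  let int_mask := (PySem.List.pyRange 1 17 1).foldl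
    (fun a i => if indexes.contains i then a + ((1 : Int) <<< (16 - i).toNat) else a) 0
  (String.ofList (bin016 16 int_mask), int_mask)

-- ===== PRECONDITION & SPEC =====
def Spec_index_to_mask (indexes : List Int) (out : String × Int) : Prop := out = index_to_mask_alt indexes
instance (indexes : List Int) (out : String × Int) : Decidable (Spec_index_to_mask indexes out) := by unfold Spec_index_to_mask; infer_instance

-- ===== CLAIM (what is proved, stated in full; the proofs are below) =====
def Claim_equal_index_to_mask : Prop := ∀ (indexes : List Int), Dom_index_to_mask indexes → Spec_index_to_mask indexes (index_to_mask indexes)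

-- ===== LEMMAS AND PROOFS =====

-- the digit character / numeric value of one membership bit
def bitChar (b : Bool) : Char := if b then '1' else '0'
def Bv (b : Bool) : Int := if b then 1 else 0

-- the common yardstick: the value of a bit list read most-significant-first
def VAZ (bs : List Bool) : Int := bs.foldl (fun a b => 2 * a + (if b then 1 else 0)) 0

theorem ite_acc (b : Bool) (x c : Int) : (if b then x + c else x) = x + c * Bv b := by
  rcases b <;> simp [Bv]

theorem ite_bv (b : Bool) : (if b then (1 : Int) else 0) = Bv b := rfl

-- B's integer fold equals the bit-list value
set_option maxRecDepth 4096 in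
theorem intB_eq_VAZ (p : Int → Bool) :
    (PySem.List.pyRange 1 17 1).foldl (fun a i => if p i then a + ((1 : Int) <<< (16 - i).toNat) else a) 0
      = VAZ ((PySem.List.pyRange 1 17 1).map p) := by
  have h : PySem.List.pyRange 1 17 1 = [1,2,3,4,5,6,7,8,9,10,11,12,13,14,15,16] := by decide
  rw [h]
  simp only [List.foldl, List.map, VAZ, ite_acc, ite_bv, Int.shiftLeft_eq]
  norm_num
  simp
  ring

-- A's string fold produces exactly the bit characters
theorem strA_toList (p : Int → Bool) :
    ∀ (l : List Int) (s : String),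
      (l.foldl (fun s i => if p i then s ++ "1" else s ++ "0") s).toList
        = s.toList ++ (l.map p).map bitChar := by
  intro l
  induction l with
  | nil => intro s; simp
  | cons x xs ih =>
      intro s
      by_cases hx : p x = true <;>
        simp [hx, ih, bitChar, String.toList_append]

-- A's digit fold over the bit characters is the bit-list value
theorem parse_bitChar (bs : List Bool) :
    (bs.map bitChar).foldl (fun a c => 2 * a + (if c == '1' then 1 else 0)) 0 = VAZ bs := by
  rw [List.foldl_map]
  have h : (fun (a : Int) b => 2 * a + (if bitChar b == '1' then 1 else 0))
      = fun (a : Int) b => 2 * a + (if b then 1 else 0) := by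
    funext a b; cases b <;> rfl
  rw [h]; rfl

theorem bin016_step (k : Nat) (a : Int) (b : Bool) :
    bin016 (k+1) (2 * a + (if b then 1 else 0)) = bin016 k a ++ [bitChar b] := by
  cases b
  · simp [bin016, bitChar]
  · have h1 : (2 * a + 1) / 2 = a := by omega
    have h2 : (2 * a + 1) % 2 = 1 := by omega
    simp [bin016, h1, h2, bitChar]

theorem bin016_VAZ : ∀ (bs : List Bool), bin016 bs.length (VAZ bs) = bs.map bitChar := by
  intro bs
  induction bs using List.reverseRecOn with
  | nil => rfl
  | append_singleton bs b ih =>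
      have hv : VAZ (bs ++ [b]) = 2 * VAZ bs + (if b then 1 else 0) := by
        simp [VAZ, List.foldl_append]
      simp only [List.length_append, List.length_cons, List.length_nil, hv,
        bin016_step, ih, List.map_append, List.map_cons, List.map_nil]

-- ===== VERDICT (by name: the statement is the Claim_ definition above) =====
theorem index_to_mask_spec : Claim_equal_index_to_mask := by
  intro indexes _
  show index_to_mask indexes = index_to_mask_alt indexes
  unfold index_to_mask index_to_mask_alt
  have h16 : PySem.List.pyRange 1 17 1 = [1,2,3,4,5,6,7,8,9,10,11,12,13,14,15,16] := by decide
  have hR : ((PySem.List.pyRange 1 17 1).map (fun i => indexes.contains i)).length = 16 := by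
    rw [h16]; simp
  have hstr := strA_toList (fun i => indexes.contains i) (PySem.List.pyRange 1 17 1) ""
  have hint := intB_eq_VAZ (fun i => indexes.contains i)
  simp only [] at hstr ⊢
  rw [hint]
  refine Prod.ext ?_ ?_
  · show _ = String.ofList (bin016 16 (VAZ _))
    rw [← hR, bin016_VAZ]
    have : ((PySem.List.pyRange 1 17 1).foldl
        (fun s i => if indexes.contains i then s ++ "1" else s ++ "0") "").toList
        = ((PySem.List.pyRange 1 17 1).map (fun i => indexes.contains i)).map bitChar := by
      simpa using hstr
    rw [← this, String.ofList_toList]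
  · show ((PySem.List.pyRange 1 17 1).foldl
        (fun s i => if indexes.contains i then s ++ "1" else s ++ "0") "").toList.foldl
        (fun a c => 2 * a + (if c == '1' then 1 else 0)) 0 = VAZ _
    rw [hstr]
    simpa using parse_bitChar ((PySem.List.pyRange 1 17 1).map (fun i => indexes.contains i))
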